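-- pv_equiv track=rewrite | github.com/czaplaadrian88-code/ziomek-dispatch- | cod_weekly/restaurant_mapper.py | _token_subset_match
-- ===== SOURCE A (Python) =====
-- def _token_subset_match(sheet_norm: str, panel_norm_to_orig: dict):
--     sheet_tokens = set(sheet_norm.split())
--     if not sheet_tokens:
--         return None
--     candidates = [
--         pn for pn in panel_norm_to_orig
--         if sheet_tokens.issubset(set(pn.split()))
--     ]
--     if len(candidates) == 1:
--         return panel_norm_to_orig[candidates[0]]
--     return None
-- ===== SOURCE B (Python) =====
-- def _token_subset_match(sheet_norm: str, panel_norm_to_orig: dict):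
--     tokens = sheet_norm.split()
--     if not tokens:
--         return None
--     # inverted index: token -> set of panel keys whose token set contains it
--     index = {}
--     for pn in panel_norm_to_orig:
--         for t in set(pn.split()):
--             index.setdefault(t, set()).add(pn)
--     cands = index.get(tokens[0], set())
--     for t in tokens[1:]:
--         cands = cands & index.get(t, set())
--     if len(cands) == 1:
--         (k,) = cands
--         return panel_norm_to_orig[k]
--     return None
-- ===== Notes on version B (the rewrite author's own statement) =====
-- stated objective: alternative
-- what changed: Replaces the per-panel subset test (rebuilding each panel's token set and checking sheet_tokens.issubset) with an inverted index token->panel-keys built in one pass, then intersects the index entries of the sheet tokens; a unique survivor is the match.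
import Mathlib
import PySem

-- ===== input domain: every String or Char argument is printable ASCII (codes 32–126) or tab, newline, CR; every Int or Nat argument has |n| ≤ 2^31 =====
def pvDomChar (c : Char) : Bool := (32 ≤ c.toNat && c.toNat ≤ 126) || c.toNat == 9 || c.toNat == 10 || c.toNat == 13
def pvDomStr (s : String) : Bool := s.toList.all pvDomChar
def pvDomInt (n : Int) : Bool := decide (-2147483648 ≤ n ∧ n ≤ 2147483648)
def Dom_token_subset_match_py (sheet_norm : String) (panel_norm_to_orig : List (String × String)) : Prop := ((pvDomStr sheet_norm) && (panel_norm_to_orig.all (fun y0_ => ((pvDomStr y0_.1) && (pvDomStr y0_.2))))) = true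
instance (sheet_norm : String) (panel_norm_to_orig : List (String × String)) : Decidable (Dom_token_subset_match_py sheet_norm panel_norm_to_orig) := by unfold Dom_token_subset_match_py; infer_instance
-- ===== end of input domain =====

-- B replaces A's per-panel subset test with an inverted index (token -> panel keys) intersected
-- over the sheet tokens: an alternative decomposition, same return value.

-- ===== PORT A =====
def token_subset_match_py (sheet_norm : String) (panel_norm_to_orig : List (String × String)) : Option String :=
  let d := PySem.Dict.ofList panel_norm_to_orig
  let sheet_tokens : PySem.Set String := PySem.Set.ofList (PySem.Str.split₀ sheet_norm)
  if sheet_tokens = [] then none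
  else
    let candidates := d.keys.filter
      (fun pn => PySem.Set.issubset sheet_tokens (PySem.Set.ofList (PySem.Str.split₀ pn)))
    match candidates with
    | [c] => d.get? c
    | _ => none
-- ===== PORT B =====
def token_subset_match_py_alt (sheet_norm : String) (panel_norm_to_orig : List (String × String)) : Option String :=
  let tokens := PySem.Str.split₀ sheet_norm
  if tokens = [] then none
  else
    let d := PySem.Dict.ofList panel_norm_to_orig
    let index : PySem.Dict String (PySem.Set String) :=
      d.keys.foldl (fun idx pn =>
          (PySem.Set.ofList (PySem.Str.split₀ pn)).foldl
            (fun idx t => idx.insert t (PySem.Set.add (idx.getD t []) pn)) idx)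
        PySem.Dict.empty
    let cands := tokens.tail.foldl (fun c t => PySem.Set.inter c (index.getD t []))
      (index.getD (tokens.headD "") [])
    if cands.length = 1 then d.get? (cands.headD "") else none

-- ===== PRECONDITION & SPEC =====
def Spec_token_subset_match_py (sheet_norm : String) (panel_norm_to_orig : List (String × String)) (out : Option String) : Prop := out = token_subset_match_py_alt sheet_norm panel_norm_to_orig
instance (sheet_norm : String) (panel_norm_to_orig : List (String × String)) (out : Option String) : Decidable (Spec_token_subset_match_py sheet_norm panel_norm_to_orig out) := by unfold Spec_token_subset_match_py; infer_instance

-- ===== CLAIM (what is proved, stated in full; the proofs are below) =====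
def Claim_equal_token_subset_match_py : Prop := ∀ (sheet_norm : String) (panel_norm_to_orig : List (String × String)), Dom_token_subset_match_py sheet_norm panel_norm_to_orig → Spec_token_subset_match_py sheet_norm panel_norm_to_orig (token_subset_match_py sheet_norm panel_norm_to_orig)

-- ===== LEMMAS AND PROOFS =====

theorem inner_fold_getD (ts : List String) (idx : PySem.Dict String (PySem.Set String))
    (pn u : String) :
    (ts.foldl (fun idx t => idx.insert t (PySem.Set.add (idx.getD t []) pn)) idx).getD u []
      = if u ∈ ts then PySem.Set.add (idx.getD u []) pn else idx.getD u [] := by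
  induction ts generalizing idx with
  | nil => simp
  | cons t ts ih =>
    simp only [List.foldl_cons]
    rw [ih, PySem.Dict.getD_insert]
    by_cases hu : u = t
    · subst hu
      by_cases hm : u ∈ ts <;> simp [hm]
    · by_cases hm : u ∈ ts <;> simp [hu, hm]

theorem index_fold_getD (ks : List String) (idx : PySem.Dict String (PySem.Set String))
    (hnd : ks.Nodup) (h : ∀ u pn, pn ∈ ks → pn ∉ idx.getD u []) (u : String) :
    (ks.foldl (fun idx pn =>
        (PySem.Set.ofList (PySem.Str.split₀ pn)).foldl
          (fun idx t => idx.insert t (PySem.Set.add (idx.getD t []) pn)) idx) idx).getD u []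
      = idx.getD u [] ++ ks.filter (fun pn => decide (u ∈ PySem.Str.split₀ pn)) := by
  induction ks generalizing idx with
  | nil => simp
  | cons pn ks ih =>
    simp only [List.foldl_cons]
    have hgetD : ∀ v, ((PySem.Set.ofList (PySem.Str.split₀ pn)).foldl
          (fun idx t => idx.insert t (PySem.Set.add (idx.getD t []) pn)) idx).getD v []
        = if v ∈ PySem.Str.split₀ pn then idx.getD v [] ++ [pn] else idx.getD v [] := by
      intro v
      rw [inner_fold_getD]
      by_cases hv : v ∈ PySem.Str.split₀ pn
      · simp [hv, PySem.Set.mem_ofList, PySem.Set.add,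
          (by simpa using h v pn (List.mem_cons_self ..) : ¬ pn ∈ idx.getD v [])]
      · simp [hv, PySem.Set.mem_ofList]
    rw [ih _ hnd.of_cons ?fresh, hgetD u]
    case fresh =>
      intro v q hq hmem
      rw [hgetD v] at hmem
      have hq' : q ∉ idx.getD v [] := h v q (List.mem_cons_of_mem _ hq)
      have : q ≠ pn := fun e => ((List.nodup_cons.1 hnd).1 (e ▸ hq)).elim
      by_cases hv : v ∈ PySem.Str.split₀ pn <;> simp [hv] at hmem <;> tauto
    by_cases hv : u ∈ PySem.Str.split₀ pn <;> simp [hv]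

theorem inter_fold (rest ks : List String) (p : String → Bool) :
    rest.foldl (fun c t => PySem.Set.inter c (ks.filter (fun pn => decide (t ∈ PySem.Str.split₀ pn)))) (ks.filter p)
      = ks.filter (fun pn => p pn && rest.all (fun t => decide (t ∈ PySem.Str.split₀ pn))) := by
  induction rest generalizing p with
  | nil => simp
  | cons t rest ih =>
    simp only [List.foldl_cons]
    have hstep : PySem.Set.inter (ks.filter p) (ks.filter (fun pn => decide (t ∈ PySem.Str.split₀ pn)))
        = ks.filter (fun pn => p pn && decide (t ∈ PySem.Str.split₀ pn)) := by
      show (ks.filter p).filter _ = _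
      rw [List.filter_filter]
      apply List.filter_congr
      intro x hx
      simp [PySem.Set.contains, hx, Bool.and_comm]
    rw [hstep, ih]
    apply List.filter_congr
    intro x hx
    simp [Bool.and_assoc]

-- ===== VERDICT (by name: the statement is the Claim_ definition above) =====
theorem token_subset_match_py_spec : Claim_equal_token_subset_match_py := by
  intro s panel _
  unfold Spec_token_subset_match_py
  unfold token_subset_match_py token_subset_match_py_alt
  cases hsp : PySem.Str.split₀ s with
  | nil => simp [PySem.Set.ofList]
  | cons t0 rest =>
    have hne : PySem.Set.ofList (t0 :: rest) ≠ [] := by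
      intro e
      have := (PySem.Set.mem_ofList (t0 :: rest) t0).2 (List.mem_cons_self ..)
      rw [e] at this; exact absurd this List.not_mem_nil
    rw [if_neg hne, if_neg (by simp : ¬ (t0 :: rest) = [])]
    set d := PySem.Dict.ofList panel with hd
    have hnd : d.keys.Nodup := PySem.Dict.nodup_keys_ofList panel
    have hidx : ∀ u, (d.keys.foldl (fun idx pn =>
        (PySem.Set.ofList (PySem.Str.split₀ pn)).foldl
          (fun idx t => idx.insert t (PySem.Set.add (idx.getD t []) pn)) idx)
        PySem.Dict.empty).getD u []
        = d.keys.filter (fun pn => decide (u ∈ PySem.Str.split₀ pn)) := by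
      intro u
      rw [index_fold_getD _ _ hnd (by simp) u]
      simp
    simp only [hidx, List.tail_cons, List.headD_cons]
    rw [inter_fold]
    have hfe : d.keys.filter
        (fun pn => PySem.Set.issubset (PySem.Set.ofList (t0 :: rest)) (PySem.Set.ofList (PySem.Str.split₀ pn)))
      = d.keys.filter (fun pn => decide (t0 ∈ PySem.Str.split₀ pn) && rest.all (fun t => decide (t ∈ PySem.Str.split₀ pn))) := by
      apply List.filter_congr
      intro pn _
      rw [Bool.eq_iff_iff]
      simp [PySem.Set.issubset_iff, PySem.Set.mem_ofList, List.all_eq_true]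
    rw [hfe]
    rcases List.filter (fun pn => decide (t0 ∈ PySem.Str.split₀ pn) && rest.all fun t => decide (t ∈ PySem.Str.split₀ pn)) d.keys with _ | ⟨c, _ | _⟩ <;> rfl
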